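-- pv_equiv track=rewrite | github.com/FrankMuti/project_euler | p_26.py | calc
-- ===== SOURCE A (Python) =====
-- def calc(num, den):
--     mp = {}
--     rem = num % den
--     res = ""
--     while (rem != 0) and (rem not in mp.keys()):
--         mp[rem] = len(res)
--         rem *= 10
--         res += str(rem // den)
--         rem %= den
--
--     return "-" if rem == 0 else res[mp[rem]:]
-- ===== SOURCE B (Python) =====
-- def calc(num, den):
--     x0 = num % den
--     # Floyd phase 1: tortoise/hare over the remainder map r -> r*10 % den
--     tortoise = x0 * 10 % den
--     hare = tortoise * 10 % den
--     while tortoise != hare: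
--         tortoise = tortoise * 10 % den
--         hare = hare * 10 % den * 10 % den
--     # Floyd phase 2: find the first remainder of the cycle
--     start = x0
--     while start != hare:
--         start = start * 10 % den
--         hare = hare * 10 % den
--     if start == 0:
--         return "-"  # the division terminates (remainder 0 repeats forever)
--     # cycle length
--     lam = 1
--     t = start * 10 % den
--     while t != start:
--         t = t * 10 % den
--         lam += 1
--     # replay one full period of the long division from the cycle start
--     digits = []
--     r = start
--     for _ in range(lam):
--         digits.append(str(r * 10 // den))
--         r = r * 10 % den
--     return "".join(digits)
-- ===== Notes on version B (the rewrite author's own statement) =====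
-- stated objective: faster
-- what changed: A stores every remainder's position in a dict while building the digit string and slices it at the repeated remainder; B uses Floyd tortoise/hare cycle detection on the remainder map r -> r*10 % den to find the cycle start and period without any dict or string bookkeeping, then replays exactly one period of digits.
import Mathlib
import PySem

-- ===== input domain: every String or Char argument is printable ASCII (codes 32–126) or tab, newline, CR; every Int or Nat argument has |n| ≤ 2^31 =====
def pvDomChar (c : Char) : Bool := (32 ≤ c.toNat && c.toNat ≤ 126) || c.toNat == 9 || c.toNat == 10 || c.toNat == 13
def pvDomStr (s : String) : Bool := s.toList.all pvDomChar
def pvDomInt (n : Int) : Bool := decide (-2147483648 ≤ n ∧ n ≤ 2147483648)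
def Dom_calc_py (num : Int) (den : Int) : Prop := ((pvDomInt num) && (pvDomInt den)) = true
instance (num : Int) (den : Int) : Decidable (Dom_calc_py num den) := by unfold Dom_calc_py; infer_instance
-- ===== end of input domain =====

-- B replaces A's dict-of-positions long division by Floyd cycle detection on the
-- remainder sequence r ↦ r*10 % den, then replays one period of digits, avoiding
-- A's dict insertions/lookups and incremental string building during detection.

-- ===== PORT A =====
-- the while loop of `calc`: state (mp, rem, res); fuel only makes it total
-- (|den| + 1 steps always suffice, proved below)
def calcLoopA (den : Int) : Nat → PySem.Dict Int Int → Int → List Char →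
    (PySem.Dict Int Int × Int × List Char)
  | 0, mp, rem, res => (mp, rem, res)
  | fuel+1, mp, rem, res =>
    if rem ≠ 0 ∧ mp.contains rem = false then
      calcLoopA den fuel (mp.insert rem (res.length : Int)) (PySem.Int.mod (rem * 10) den)
        (res ++ PySem.Int.toChars (PySem.Int.floordiv (rem * 10) den))
    else (mp, rem, res)

def calc_py (num : Int) (den : Int) : String :=
  match calcLoopA den (den.natAbs + 1) PySem.Dict.empty (PySem.Int.mod num den) [] with
  | (mp, rem, res) =>
    if rem = 0 then "-"
    else String.ofList (PySem.List.slice res (some (mp.getD rem 0)) none)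

-- ===== PORT B =====
-- r * 10 % den, the remainder transition of the long division
def pvStepB (den r : Int) : Int := PySem.Int.mod (r * 10) den

-- Floyd phase 1: while tortoise != hare: tortoise = f(tortoise); hare = f(f(hare))
def floydMeetB (den : Int) : Nat → Int → Int → Int
  | 0, _, hare => hare
  | fuel+1, tortoise, hare =>
    if tortoise = hare then hare
    else floydMeetB den fuel (pvStepB den tortoise) (pvStepB den (pvStepB den hare))

-- Floyd phase 2: while start != hare: start = f(start); hare = f(hare)
def floydStartB (den : Int) : Nat → Int → Int → Int
  | 0, start, _ => start
  | fuel+1, start, hare =>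
    if start = hare then start
    else floydStartB den fuel (pvStepB den start) (pvStepB den hare)

-- lam = 1; t = f(start); while t != start: t = f(t); lam += 1
def cycLenB (den s : Int) : Nat → Int → Nat → Nat
  | 0, _, lam => lam
  | fuel+1, t, lam => if t = s then lam else cycLenB den s fuel (pvStepB den t) (lam + 1)

-- for _ in range(lam): digits.append(str(r * 10 // den)); r = f(r)  — then "".join
def emitB (den : Int) : Nat → Int → List Char
  | 0, _ => []
  | n+1, r => PySem.Int.toChars (PySem.Int.floordiv (r * 10) den) ++ emitB den n (pvStepB den r)

def calc_py_alt (num : Int) (den : Int) : String :=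
  let x0 := PySem.Int.mod num den
  let tor := pvStepB den x0
  let meet := floydMeetB den (2 * den.natAbs + 2) tor (pvStepB den tor)
  let start := floydStartB den (den.natAbs + 1) x0 meet
  if start = 0 then "-"
  else String.ofList (emitB den (cycLenB den start (den.natAbs + 1) (pvStepB den start) 1) start)

-- ===== PRECONDITION & SPEC =====
-- den = 0 makes Python's `num % den` raise ZeroDivisionError (in A and in B alike)
def Pre_calc_py (num : Int) (den : Int) : Prop := den ≠ 0
instance (num : Int) (den : Int) : Decidable (Pre_calc_py num den) := by
  unfold Pre_calc_py; infer_instance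

def pvWitness_calc_py : Int × Int := (1, 7)

def Spec_calc_py (num : Int) (den : Int) (out : String) : Prop := out = calc_py_alt num den
instance (num : Int) (den : Int) (out : String) : Decidable (Spec_calc_py num den out) := by
  unfold Spec_calc_py; infer_instance

-- ===== CLAIM (what is proved, stated in full; the proofs are below) =====
def Claim_equal_calc_py : Prop := ∀ (num : Int) (den : Int), Dom_calc_py num den →
  Pre_calc_py num den → Spec_calc_py num den (calc_py num den)

-- ===== LEMMAS AND PROOFS =====

-- the remainder sequence x n = f^[n] (num % den)
def pvX (num den : Int) (n : Nat) : Int := (pvStepB den)^[n] (PySem.Int.mod num den)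

-- digit emitted at step n, and the string of the first n digits
def pvDigit (num den : Int) (n : Nat) : Int := PySem.Int.floordiv (pvX num den n * 10) den

def pvRes (num den : Int) (n : Nat) : List Char :=
  (List.range n).flatMap (fun i => PySem.Int.toChars (pvDigit num den i))

theorem pvX_succ (num den : Int) (n : Nat) :
    pvX num den (n + 1) = pvStepB den (pvX num den n) := by
  simp [pvX, Function.iterate_succ_apply']

theorem pvMod_bounds (a den : Int) (hden : den ≠ 0) :
    (0 < den ∧ 0 ≤ PySem.Int.mod a den ∧ PySem.Int.mod a den < den) ∨
    (den < 0 ∧ den < PySem.Int.mod a den ∧ PySem.Int.mod a den ≤ 0) := by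
  rcases lt_or_gt_of_ne hden with h | h
  · exact Or.inr ⟨h, PySem.Int.mod_neg_bounds a h⟩
  · exact Or.inl ⟨h, PySem.Int.mod_nonneg a h, PySem.Int.mod_lt a h⟩

theorem pvX_bounds (num den : Int) (n : Nat) (hden : den ≠ 0) :
    (0 < den ∧ 0 ≤ pvX num den n ∧ pvX num den n < den) ∨
    (den < 0 ∧ den < pvX num den n ∧ pvX num den n ≤ 0) := by
  cases n with
  | zero => exact pvMod_bounds num den hden
  | succ m => rw [pvX_succ]; exact pvMod_bounds _ den hden

theorem pvStepB_zero (den : Int) : pvStepB den 0 = 0 := by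
  have : den ∣ (0 * 10 : Int) := ⟨0, by ring⟩
  simpa [pvStepB] using (PySem.Int.mod_eq_zero_iff_dvd (0 * 10) den).2 this

theorem pvDigit_bounds (num den : Int) (n : Nat) (hden : den ≠ 0) :
    0 ≤ pvDigit num den n ∧ pvDigit num den n < 10 := by
  rcases pvX_bounds num den n hden with ⟨hpos, h0, h1⟩ | ⟨hneg, h0, h1⟩
  · constructor
    · exact (PySem.Int.le_floordiv_iff_mul_le hpos).2 (by nlinarith)
    · exact (PySem.Int.floordiv_lt_iff_lt_mul hpos).2 (by nlinarith)
  · have hrw : pvDigit num den n =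
        PySem.Int.floordiv (-(pvX num den n * 10)) (-den) := by
      rw [pvDigit, ← PySem.Int.floordiv_neg_neg (pvX num den n * 10) den]
    have hpos : (0:Int) < -den := by omega
    rw [hrw]
    constructor
    · exact (PySem.Int.le_floordiv_iff_mul_le hpos).2 (by nlinarith)
    · exact (PySem.Int.floordiv_lt_iff_lt_mul hpos).2 (by nlinarith)

theorem pvChars_len (d : Int) (h0 : 0 ≤ d) (h9 : d < 10) :
    (PySem.Int.toChars d).length = 1 := by
  interval_cases d <;> decide

theorem pvRes_succ (num den : Int) (n : Nat) :
    pvRes num den (n + 1) = pvRes num den n ++ PySem.Int.toChars (pvDigit num den n) := by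
  simp [pvRes, List.range_succ]

theorem pvRes_len (num den : Int) (hden : den ≠ 0) (n : Nat) :
    (pvRes num den n).length = n := by
  induction n with
  | zero => rfl
  | succ m ih =>
    rw [pvRes_succ, List.length_append, ih,
      pvChars_len _ (pvDigit_bounds num den m hden).1 (pvDigit_bounds num den m hden).2]

-- shifting an equality of sequence values forward
theorem pvX_shift (num den : Int) (a b d : Nat) (h : pvX num den a = pvX num den b) :
    pvX num den (a + d) = pvX num den (b + d) := by
  induction d with
  | zero => simpa using h
  | succ e ih => rw [show a + (e+1) = (a+e) + 1 by ring, show b + (e+1) = (b+e) + 1 by ring,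
      pvX_succ, pvX_succ, ih]

theorem pvX_per (num den : Int) (μ lam : Nat)
    (hper : pvX num den (μ + lam) = pvX num den μ) :
    ∀ i, μ ≤ i → pvX num den (i + lam) = pvX num den i := by
  intro i hi
  have := pvX_shift num den (μ + lam) μ (i - μ) hper
  have h1 : μ + lam + (i - μ) = i + lam := by omega
  have h2 : μ + (i - μ) = i := by omega
  rwa [h1, h2] at this

theorem pvX_perc (num den : Int) (μ lam : Nat)
    (hper : pvX num den (μ + lam) = pvX num den μ) :
    ∀ c i, μ ≤ i → pvX num den (i + c * lam) = pvX num den i := by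
  intro c
  induction c with
  | zero => simp
  | succ e ih =>
    intro i hi
    have h1 : i + (e+1) * lam = (i + e * lam) + lam := by ring
    rw [h1, pvX_per num den μ lam hper (i + e*lam) (by omega), ih i hi]

theorem pvX_canon (num den : Int) (μ lam : Nat)
    (hper : pvX num den (μ + lam) = pvX num den μ) :
    ∀ n, μ ≤ n → pvX num den n = pvX num den (μ + (n - μ) % lam) := by
  intro n hn
  have hd : μ + (n - μ) % lam + ((n - μ) / lam) * lam = n := by
    have h1 := Nat.div_add_mod (n - μ) lam
    have h2 : lam * ((n - μ) / lam) = ((n - μ) / lam) * lam := Nat.mul_comm _ _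
    omega
  calc pvX num den n = pvX num den (μ + (n - μ) % lam + ((n - μ) / lam) * lam) := by rw [hd]
    _ = pvX num den (μ + (n - μ) % lam) := pvX_perc num den μ lam hper _ _ (by omega)

-- the fundamental characterisation: x i = x (i+t) (t > 0) iff i is past the tail
-- and t is a multiple of the period
theorem pvX_eq_iff (num den : Int) (μ lam : Nat) (hlam : 0 < lam)
    (hper : pvX num den (μ + lam) = pvX num den μ)
    (hdist : ∀ i j, i < μ + lam → j < μ + lam → pvX num den i = pvX num den j → i = j) :
    ∀ i t, 0 < t → (pvX num den i = pvX num den (i + t) ↔ (μ ≤ i ∧ lam ∣ t)) := by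
  intro i t ht
  constructor
  · intro heq
    -- first: x i recurs arbitrarily often, hence is a cycle value, hence μ ≤ i
    have hrec : ∀ c, pvX num den (i + c * t) = pvX num den i := by
      intro c
      induction c with
      | zero => simp
      | succ e ih =>
        calc pvX num den (i + (e+1) * t)
            = pvX num den ((i + t) + e * t) := by rw [show i + (e+1)*t = (i+t) + e*t by ring]
          _ = pvX num den (i + e * t) := pvX_shift num den (i+t) i (e*t) heq.symm
          _ = pvX num den i := ih
    have hmu : μ ≤ i := by
      by_contra hlt
      push_neg at hlt
      -- pick c with i + c*t ≥ μ, reduce to a canonical cycle index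
      have hge : μ ≤ i + μ * t := by nlinarith
      have h1 : pvX num den (i + μ * t) = pvX num den i := hrec μ
      have h2 := pvX_canon num den μ lam hper (i + μ * t) hge
      have h3 : pvX num den i = pvX num den (μ + (i + μ * t - μ) % lam) := by
        rw [← h1, h2]
      have h4 := hdist i (μ + (i + μ * t - μ) % lam) (by omega)
        (by have := Nat.mod_lt (i + μ * t - μ) hlam; omega) h3
      omega
    refine ⟨hmu, ?_⟩
    have h2 := pvX_canon num den μ lam hper i hmu
    have h3 := pvX_canon num den μ lam hper (i + t) (by omega)
    have h4 : pvX num den (μ + (i - μ) % lam) = pvX num den (μ + (i + t - μ) % lam) := by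
      rw [← h2, ← h3, heq]
    have h5 := hdist _ _ (by have := Nat.mod_lt (i - μ) hlam; omega)
      (by have := Nat.mod_lt (i + t - μ) hlam; omega) h4
    have h6 : (i - μ) % lam = (i + t - μ) % lam := by omega
    have h7 : (i - μ) ≡ (i + t - μ) [MOD lam] := h6
    have h8 := (Nat.modEq_iff_dvd' (by omega)).1 h7
    have h9 : i + t - μ - (i - μ) = t := by omega
    rwa [h9] at h8
  · rintro ⟨hmu, c, rfl⟩
    have h1 : i + lam * c = i + c * lam := by ring
    rw [h1, pvX_perc num den μ lam hper c i hmu]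

-- characterisation of A's while loop
theorem pvLoopA_run (num den : Int) (hden : den ≠ 0) (k : Nat)
    (hnz : ∀ i, i < k → pvX num den i ≠ 0)
    (hfresh : ∀ i j, j < i → i < k → pvX num den j ≠ pvX num den i)
    (hstop : pvX num den k = 0 ∨ ∃ j, j < k ∧ pvX num den j = pvX num den k) :
    ∀ fuel n (mp : PySem.Dict Int Int), n ≤ k → k - n ≤ fuel →
    (∀ i, i < n → mp.get? (pvX num den i) = some (i : Int)) →
    (∀ v, (∀ i, i < n → pvX num den i ≠ v) → mp.get? v = none) →
    ∃ mp', calcLoopA den fuel mp (pvX num den n) (pvRes num den n) =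
        (mp', pvX num den k, pvRes num den k) ∧
      (∀ i, i < k → mp'.get? (pvX num den i) = some (i : Int)) := by
  intro fuel
  induction fuel with
  | zero =>
    intro n mp hn hfuel hs hno
    have hnk : n = k := by omega
    subst hnk
    exact ⟨mp, rfl, hs⟩
  | succ f ih =>
    intro n mp hn hfuel hs hno
    by_cases hnk : n = k
    · subst hnk
      refine ⟨mp, ?_, hs⟩
      rw [calcLoopA]
      have hcond : ¬ (pvX num den n ≠ 0 ∧ mp.contains (pvX num den n) = false) := by
        rcases hstop with h0 | ⟨j, hj, hje⟩
        · intro h; exact h.1 h0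
        · intro h
          have hnone : mp.get? (pvX num den n) = none :=
            (PySem.Dict.get?_eq_none_iff_contains mp (pvX num den n)).2 h.2
          have hgd := hs j hj
          rw [hje, hnone] at hgd
          simp at hgd
      rw [if_neg hcond]
    · have hlt : n < k := by omega
      rw [calcLoopA]
      have hzer : pvX num den n ≠ 0 := hnz n hlt
      have hnomem : mp.get? (pvX num den n) = none :=
        hno _ (fun i hi => hfresh n i hi hlt)
      have hcond : pvX num den n ≠ 0 ∧ mp.contains (pvX num den n) = false :=
        ⟨hzer, (PySem.Dict.get?_eq_none_iff_contains mp (pvX num den n)).1 hnomem⟩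
      rw [if_pos hcond]
      have hlen : ((pvRes num den n).length : Int) = (n : Int) := by
        rw [pvRes_len num den hden n]
      have hmodstep : PySem.Int.mod (pvX num den n * 10) den = pvX num den (n + 1) := by
        rw [pvX_succ]; rfl
      have hresstep : pvRes num den n ++
          PySem.Int.toChars (PySem.Int.floordiv (pvX num den n * 10) den) =
          pvRes num den (n + 1) := by
        rw [pvRes_succ]; rfl
      rw [hlen, hmodstep, hresstep]
      exact ih (n+1) (mp.insert (pvX num den n) (n : Int)) (by omega) (by omega)
        (by
          intro i hi
          by_cases hie : i = n
          · subst hie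
            rw [PySem.Dict.get?_insert_self]
          · have hine : pvX num den i ≠ pvX num den n :=
              hfresh n i (by omega) hlt
            rw [PySem.Dict.get?_insert_of_ne _ _ hine]
            exact hs i (by omega))
        (by
          intro v hv
          have hne : v ≠ pvX num den n := fun h => hv n (by omega) h.symm
          rw [PySem.Dict.get?_insert_of_ne _ _ hne]
          exact hno v (fun i hi => hv i (by omega)))

-- characterisation of B's loops
theorem pvMeet_run (num den : Int) (M : Nat) (hM1 : 1 ≤ M)
    (hMeq : pvX num den M = pvX num den (M + M))
    (hMmin : ∀ t, 1 ≤ t → t < M → pvX num den t ≠ pvX num den (t + t)) :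
    ∀ fuel t, 1 ≤ t → t ≤ M → M - t ≤ fuel →
    floydMeetB den fuel (pvX num den t) (pvX num den (t + t)) = pvX num den (M + M) := by
  intro fuel
  induction fuel with
  | zero =>
    intro t h1 h2 h3
    have : t = M := by omega
    subst this
    simp [floydMeetB]
  | succ f ih =>
    intro t h1 h2 h3
    rw [floydMeetB]
    by_cases htM : t = M
    · subst htM
      rw [if_pos hMeq]
    · rw [if_neg (hMmin t h1 (by omega))]
      have e1 : pvStepB den (pvX num den t) = pvX num den (t + 1) := (pvX_succ num den t).symm
      have e2 : pvStepB den (pvStepB den (pvX num den (t + t))) = pvX num den ((t+1) + (t+1)) := by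
        rw [← pvX_succ, ← pvX_succ]
        congr 1
        ring
      rw [e1, e2]
      exact ih (t+1) (by omega) (by omega) (by omega)

theorem pvStart_run (num den : Int) (μ T : Nat)
    (heq : pvX num den μ = pvX num den (T + μ))
    (hlt : ∀ i, i < μ → pvX num den i ≠ pvX num den (T + i)) :
    ∀ fuel i, i ≤ μ → μ - i ≤ fuel →
    floydStartB den fuel (pvX num den i) (pvX num den (T + i)) = pvX num den μ := by
  intro fuel
  induction fuel with
  | zero =>
    intro i h1 h2
    have : i = μ := by omega
    subst this
    simp [floydStartB]
  | succ f ih =>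
    intro i h1 h2
    rw [floydStartB]
    by_cases hiμ : i = μ
    · subst hiμ
      rw [if_pos heq]
    · rw [if_neg (hlt i (by omega))]
      have e1 : pvStepB den (pvX num den i) = pvX num den (i + 1) := (pvX_succ num den i).symm
      have e2 : pvStepB den (pvX num den (T + i)) = pvX num den (T + (i + 1)) := by
        rw [show T + (i+1) = (T+i) + 1 by ring, pvX_succ]
      rw [e1, e2]
      exact ih (i+1) (by omega) (by omega)

theorem pvCycLen_run (num den : Int) (μ lam : Nat) (hlam : 0 < lam)
    (heq : pvX num den (μ + lam) = pvX num den μ)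
    (hdist : ∀ i j, i < μ + lam → j < μ + lam → pvX num den i = pvX num den j → i = j) :
    ∀ fuel p, 1 ≤ p → p ≤ lam → lam - p ≤ fuel →
    cycLenB den (pvX num den μ) fuel (pvX num den (μ + p)) p = lam := by
  intro fuel
  induction fuel with
  | zero =>
    intro p h1 h2 h3
    have : p = lam := by omega
    subst this
    simp [cycLenB]
  | succ f ih =>
    intro p h1 h2 h3
    rw [cycLenB]
    by_cases hpl : p = lam
    · subst hpl
      rw [if_pos heq]
    · have hne : pvX num den (μ + p) ≠ pvX num den μ := by
        intro h
        have := hdist (μ + p) μ (by omega) (by omega) h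
        omega
      rw [if_neg hne, ← pvX_succ, show (μ + p) + 1 = μ + (p + 1) by ring]
      exact ih (p+1) (by omega) (by omega) (by omega)

theorem pvEmit_run (num den : Int) :
    ∀ lam μ, emitB den lam (pvX num den μ) =
      (List.range' μ lam).flatMap (fun i => PySem.Int.toChars (pvDigit num den i)) := by
  intro lam
  induction lam with
  | zero => intro μ; simp [emitB]
  | succ l ih =>
    intro μ
    rw [emitB, ← pvX_succ, ih (μ + 1), List.range'_succ]
    simp [pvDigit]

-- splitting the digit string at μ
theorem pvRes_split (num den : Int) (μ k : Nat) (h : μ ≤ k) :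
    pvRes num den k = pvRes num den μ ++
      (List.range' μ (k - μ)).flatMap (fun i => PySem.Int.toChars (pvDigit num den i)) := by
  have hr : List.range k = List.range' 0 μ ++ List.range' μ (k - μ) := by
    rw [List.range_eq_range', show k = μ + (k - μ) by omega]
    simpa using (@List.range'_append 0 μ (k - μ) 1).symm
  rw [pvRes, hr, List.flatMap_append]
  congr 1
  rw [pvRes, List.range_eq_range']

-- pigeonhole: the loop stop condition is reached within |den| steps
theorem pvStop_exists (num den : Int) (hden : den ≠ 0) :
    ∃ n, n ≤ den.natAbs ∧ (pvX num den n = 0 ∨ ∃ j, j < n ∧ pvX num den j = pvX num den n) := by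
  by_contra hcon
  push_neg at hcon
  classical
  set S : Finset Int := if 0 < den then Finset.Ioo 0 den else Finset.Ioo den 0 with hS
  have hcard : S.card < (Finset.range (den.natAbs + 1)).card := by
    rcases lt_or_gt_of_ne hden with h | h
    · rw [hS, if_neg (by omega), Finset.card_range, Int.card_Ioo]
      omega
    · rw [hS, if_pos h, Finset.card_range, Int.card_Ioo]
      omega
  have hmaps : Set.MapsTo (pvX num den) ↑(Finset.range (den.natAbs + 1)) ↑S := by
    intro n hn
    simp only [Finset.coe_range, Set.mem_Iio] at hn
    have hb := pvX_bounds num den n hden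
    have hnz := (hcon n (by omega)).1
    simp only [Finset.mem_coe]
    rcases hb with ⟨hp, h0, h1⟩ | ⟨hp, h0, h1⟩
    · rw [hS, if_pos hp, Finset.mem_Ioo]
      omega
    · rw [hS, if_neg (by omega), Finset.mem_Ioo]
      omega
  obtain ⟨a, ha, b, hb, hne, heq⟩ :=
    Finset.exists_ne_map_eq_of_card_lt_of_maps_to hcard hmaps
  rw [Finset.mem_range] at ha hb
  rcases Nat.lt_or_ge a b with hab | hab
  · exact (hcon b (by omega)).2 a hab heq
  · exact (hcon a (by omega)).2 b (by omega) heq.symm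

-- ===== MAIN PROOF =====

theorem pv_main (num den : Int) (hden : den ≠ 0) :
    calc_py num den = calc_py_alt num den := by
  classical
  obtain ⟨n0, hn0le, hstop0⟩ := pvStop_exists num den hden
  have hex : ∃ n, (pvX num den n = 0 ∨ ∃ j, j < n ∧ pvX num den j = pvX num den n) :=
    ⟨n0, hstop0⟩
  set k := Nat.find hex with hkdef
  have hkstop : pvX num den k = 0 ∨ ∃ j, j < k ∧ pvX num den j = pvX num den k :=
    Nat.find_spec hex
  have hkmin : ∀ i, i < k →
      ¬(pvX num den i = 0 ∨ ∃ j, j < i ∧ pvX num den j = pvX num den i) :=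
    fun i hi => Nat.find_min hex hi
  have hkle : k ≤ den.natAbs := le_trans (Nat.find_min' hex hstop0) hn0le
  have hnz : ∀ i, i < k → pvX num den i ≠ 0 := fun i hi h => hkmin i hi (Or.inl h)
  have hfresh : ∀ i j, j < i → i < k → pvX num den j ≠ pvX num den i :=
    fun i j hji hik h => hkmin i hik (Or.inr ⟨j, hji, h⟩)
  -- choose the tail length μ and the period lam
  obtain ⟨μ, lam, h3, hμlam, hμk, hcase⟩ :
      ∃ μ lam : Nat, 0 < lam ∧ μ + lam ≤ k + 1 ∧ μ ≤ k ∧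
        ((μ = k ∧ lam = 1 ∧ pvX num den k = 0) ∨
         (μ + lam = k ∧ μ < k ∧ pvX num den μ = pvX num den k ∧ pvX num den μ ≠ 0)) := by
    by_cases hz : pvX num den k = 0
    · exact ⟨k, 1, one_pos, by omega, le_rfl, Or.inl ⟨rfl, rfl, hz⟩⟩
    · obtain ⟨j, hj, hje⟩ := hkstop.resolve_left hz
      exact ⟨j, k - j, by omega, by omega, by omega, Or.inr ⟨by omega, hj, hje, hnz j hj⟩⟩
  have h1 : pvX num den (μ + lam) = pvX num den μ := by
    rcases hcase with ⟨hμe, hle, hz⟩ | ⟨hke, hμlt, hxe, hxnz⟩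
    · subst hμe; subst hle
      rw [pvX_succ, hz, pvStepB_zero]
    · rw [hke, ← hxe]
  have h2 : ∀ i j, i < μ + lam → j < μ + lam →
      pvX num den i = pvX num den j → i = j := by
    intro i j hi hj he
    rcases hcase with ⟨hμe, hle, hz⟩ | ⟨hke, hμlt, hxe, hxnz⟩
    · -- indices below k+1
      have hik : i ≤ k := by omega
      have hjk : j ≤ k := by omega
      by_contra hne
      rcases Nat.lt_or_ge i j with hij | hij
      · rcases Nat.lt_or_ge j k with hjc | hjc
        · exact hfresh j i hij hjc he
        · have hjke : j = k := by omega
          subst hjke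
          rw [hz] at he
          exact hnz i (by omega) he
      · have hji : j < i := by omega
        rcases Nat.lt_or_ge i k with hic | hic
        · exact hfresh i j hji hic he.symm
        · have hike : i = k := by omega
          subst hike
          rw [hz] at he
          exact hnz j (by omega) he.symm
    · by_contra hne
      rcases Nat.lt_or_ge i j with hij | hij
      · exact hfresh j i hij (by omega) he
      · exact hfresh i j (by omega) (by omega) he.symm
  have h4 : μ + lam ≤ den.natAbs + 1 := by omega
  -- ===== A's value =====
  obtain ⟨mp', hrun, hs'⟩ := pvLoopA_run num den hden k hnz hfresh hkstop
    (den.natAbs + 1) 0 PySem.Dict.empty (by omega) (by omega)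
    (by intro i hi; omega)
    (by intro v _; exact PySem.Dict.get?_empty v)
  have hA : calc_py num den = (if pvX num den k = 0 then "-" else
      String.ofList (PySem.List.slice (pvRes num den k)
        (some (mp'.getD (pvX num den k) 0)) none)) := by
    unfold calc_py
    have e0 : PySem.Int.mod num den = pvX num den 0 := rfl
    have e1 : ([] : List Char) = pvRes num den 0 := rfl
    rw [e0, e1, hrun]
  -- ===== B's value =====
  have hiff := pvX_eq_iff num den μ lam h3 h1 h2
  -- a meeting time exists (the first multiple of lam past μ)
  have hd := Nat.div_add_mod μ lam
  have hm := Nat.mod_lt μ h3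
  have htstar : 0 < lam * (μ / lam) + lam ∧ pvX num den (lam * (μ / lam) + lam) =
      pvX num den ((lam * (μ / lam) + lam) + (lam * (μ / lam) + lam)) := by
    refine ⟨by omega, ?_⟩
    exact (hiff (lam * (μ / lam) + lam) (lam * (μ / lam) + lam) (by omega)).2
      ⟨by omega, ⟨μ / lam + 1, by ring⟩⟩
  have hMex : ∃ t, 0 < t ∧ pvX num den t = pvX num den (t + t) :=
    ⟨lam * (μ / lam) + lam, htstar⟩
  set M := Nat.find hMex with hMdef
  have hMspec : 0 < M ∧ pvX num den M = pvX num den (M + M) := Nat.find_spec hMex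
  have hM1 : 1 ≤ M := hMspec.1
  have hMeq : pvX num den M = pvX num den (M + M) := hMspec.2
  have hMmin : ∀ t, 1 ≤ t → t < M → pvX num den t ≠ pvX num den (t + t) := by
    intro t h1t h2t he
    exact Nat.find_min hMex h2t ⟨by omega, he⟩
  have hMle : M ≤ μ + lam :=
    le_trans (Nat.find_min' hMex htstar) (by omega)
  have hMdvd : μ ≤ M ∧ lam ∣ M := (hiff M M (by omega)).1 hMeq
  -- phase 2 hypotheses, with T = M + M
  have hTeq : pvX num den μ = pvX num den ((M + M) + μ) := by
    have := (hiff μ (M + M) (by omega)).2 ⟨le_rfl, dvd_add hMdvd.2 hMdvd.2⟩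
    rwa [Nat.add_comm μ (M + M)] at this
  have hTlt : ∀ i, i < μ → pvX num den i ≠ pvX num den ((M + M) + i) := by
    intro i hi he
    rw [Nat.add_comm (M + M) i] at he
    have := ((hiff i (M + M) (by omega)).1 he).1
    omega
  have hmeet := pvMeet_run num den M hM1 hMeq hMmin (2 * den.natAbs + 2) 1
    le_rfl hM1 (by omega)
  have hstart := pvStart_run num den μ (M + M) hTeq hTlt (den.natAbs + 1) 0
    (by omega) (by omega)
  have hB : calc_py_alt num den = (if pvX num den μ = 0 then "-" else
      String.ofList (emitB den (cycLenB den (pvX num den μ) (den.natAbs + 1)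
        (pvStepB den (pvX num den μ)) 1) (pvX num den μ))) := by
    have e0 : PySem.Int.mod num den = pvX num den 0 := rfl
    have e1 : pvStepB den (pvX num den 0) = pvX num den 1 := (pvX_succ num den 0).symm
    have e2 : pvStepB den (pvX num den 1) = pvX num den (1 + 1) := (pvX_succ num den 1).symm
    have hstart' : floydStartB den (den.natAbs + 1) (pvX num den 0)
        (pvX num den (M + M)) = pvX num den μ := by simpa using hstart
    simp only [calc_py_alt]
    rw [e0, e1, e2, hmeet, hstart']
  -- ===== put the two together =====
  rcases hcase with ⟨hμe, hle, hz⟩ | ⟨hke, hμlt, hxe, hxnz⟩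
  · -- terminating division: both return "-"
    have hzμ : pvX num den μ = 0 := by rw [hμe, hz]
    rw [hA, hB, if_pos hz, if_pos hzμ]
  · -- repeating case
    have hzk : pvX num den k ≠ 0 := by rw [← hxe]; exact hxnz
    rw [hA, hB, if_neg hzk, if_neg hxnz]
    -- A's slice index is μ
    have hgd : mp'.getD (pvX num den k) 0 = ((μ : Nat) : Int) := by
      rw [← hxe]
      exact PySem.Dict.getD_of_get?_eq_some mp' 0 (hs' μ hμlt)
    rw [hgd, PySem.List.slice_from_natCast]
    -- B's cycle length is lam
    have hc1 : pvStepB den (pvX num den μ) = pvX num den (μ + 1) := (pvX_succ num den μ).symm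
    rw [hc1, pvCycLen_run num den μ lam h3 h1 h2 (den.natAbs + 1) 1 le_rfl h3 (by omega)]
    -- the emitted digits are exactly the dropped tail
    rw [pvEmit_run num den lam μ,
      pvRes_split num den μ k hμk,
      List.drop_left' (pvRes_len num den hden μ),
      show k - μ = lam by omega]

-- ===== VERDICT (by name: the statement is the Claim_ definition above) =====
theorem calc_py_spec : Claim_equal_calc_py := by
  intro num den _ hpre
  unfold Spec_calc_py
  exact pv_main num den hpre
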